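-- pv_equiv track=rewrite | github.com/acornaeology/acornaeology.github.io | generator/disassembly.py | _find_relocated_sections
-- ===== SOURCE A (Python) =====
-- def _find_relocated_sections(items, sub_lookup):
--     """Return the set of subroutine start addresses whose sections contain
--     any relocated items (items with binary_addr)."""
--     relocated = set()
--     current_start = None
--     has_binary = False
--
--     for item in items:
--         sub = sub_lookup.get((item["addr"], item.get("binary_addr")))
--         if sub and sub.get("title"):
--             if has_binary and current_start is not None:
--                 relocated.add(current_start)
--             current_start = (item["addr"], item.get("binary_addr"))
--             has_binary = False
--         if "binary_addr" in item:
--             has_binary = True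
--
--     if has_binary and current_start is not None:
--         relocated.add(current_start)
--
--     return relocated
-- ===== SOURCE B (Python) =====
-- def _find_relocated_sections(items, sub_lookup):
--     """Group items into sections (each opened by a titled-sub boundary item),
--     then collect the start keys of sections containing any relocated item."""
--     sections = []
--     for item in items:
--         key = (item["addr"], item.get("binary_addr"))
--         sub = sub_lookup.get(key)
--         if sub and sub.get("title"):
--             sections.append((key, []))
--         if sections:
--             sections[-1][1].append(item)
--     return {key for key, group in sections
--             if any("binary_addr" in it for it in group)}
-- ===== Notes on version B (the rewrite author's own statement) =====
-- stated objective: alternative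
-- what changed: A's single pass threading (current_start, has_binary) loop state is replaced by a two-pass decomposition: first group the items into sections keyed by their titled-sub boundary item (dropping items before the first boundary), then collect the start keys of sections containing any item with binary_addr.
-- outside the precondition, e.g. on _find_relocated_sections([{}], {}): A raises KeyError, B raises KeyError
import Mathlib
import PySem

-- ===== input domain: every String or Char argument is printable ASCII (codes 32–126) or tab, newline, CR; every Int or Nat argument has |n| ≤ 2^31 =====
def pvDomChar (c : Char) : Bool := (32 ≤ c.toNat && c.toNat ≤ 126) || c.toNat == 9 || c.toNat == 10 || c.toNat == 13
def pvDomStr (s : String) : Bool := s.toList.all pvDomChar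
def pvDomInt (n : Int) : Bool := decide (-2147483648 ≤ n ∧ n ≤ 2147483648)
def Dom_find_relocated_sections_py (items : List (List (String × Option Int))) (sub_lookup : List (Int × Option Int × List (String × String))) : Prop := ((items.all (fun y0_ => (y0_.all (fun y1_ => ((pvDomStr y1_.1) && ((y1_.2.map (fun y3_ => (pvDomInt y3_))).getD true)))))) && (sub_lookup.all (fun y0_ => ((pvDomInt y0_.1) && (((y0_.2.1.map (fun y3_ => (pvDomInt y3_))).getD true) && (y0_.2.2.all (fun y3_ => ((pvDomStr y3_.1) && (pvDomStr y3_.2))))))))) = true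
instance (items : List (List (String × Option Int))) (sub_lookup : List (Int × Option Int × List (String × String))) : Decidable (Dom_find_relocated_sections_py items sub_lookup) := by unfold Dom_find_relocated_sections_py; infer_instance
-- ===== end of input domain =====

-- B replaces A's carried (current_start, has_binary) loop state by an explicit two-pass
-- decomposition (group items into sections, then filter the sections); objective: alternative.
-- Both ports return the result set as its list of distinct elements in first-insertion order.

-- shared helper: `sub_lookup.get((item["addr"], item.get("binary_addr")))` followed by the
-- truthiness test `sub and sub.get("title")`; both Pythons contain these lines verbatim.
-- `item["addr"]` raises KeyError when "addr" is absent — Pre_ excludes that; `.getD none` is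
-- exact under Pre_.
def pvSectionKey? (sub_lookup : List (Int × Option Int × List (String × String))) (item : List (String × Option Int)) : Option (Int × Option Int) :=
  let addrv : Option Int := ((PySem.Dict.mk item).get? "addr").getD none
  let binv : Option Int := (PySem.Dict.mk item).getD "binary_addr" none
  match addrv with
  | none => none   -- item["addr"] is Python None: the key (None, b) matches no (int, b') key
  | some a =>
    match (PySem.Dict.mk (sub_lookup.map (fun p => ((p.1, p.2.1), p.2.2)))).get? (a, binv) with
    | none => none
    | some sub =>
      -- `sub and sub.get("title")`: truthy iff the dict is non-empty and "title" maps to a non-empty string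
      if ((PySem.Dict.mk sub).getD "title" "") ≠ "" then some (a, binv) else none

-- ===== PORT A =====
-- loop body of A: state (relocated, current_start, has_binary)
def pvStepA (sub_lookup : List (Int × Option Int × List (String × String)))
    (st : PySem.Set (Int × Option Int) × Option (Int × Option Int) × Bool)
    (item : List (String × Option Int)) :
    PySem.Set (Int × Option Int) × Option (Int × Option Int) × Bool :=
  let (rel, cs, hb) := st
  let (rel, cs, hb) :=
    match pvSectionKey? sub_lookup item with
    | some k =>
      -- if has_binary and current_start is not None: relocated.add(current_start)
      let rel := if hb then (match cs with | some c => rel.add c | none => rel) else rel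
      (rel, some k, false)
    | none => (rel, cs, hb)
  -- if "binary_addr" in item: has_binary = True
  let hb := if (PySem.Dict.mk item).contains "binary_addr" then true else hb
  (rel, cs, hb)

-- final `if has_binary and current_start is not None: relocated.add(current_start)`
def pvFinA (st : PySem.Set (Int × Option Int) × Option (Int × Option Int) × Bool) :
    List (Int × Option Int) :=
  match st.2.1 with
  | some c => if st.2.2 then st.1.add c else st.1
  | none => st.1

def find_relocated_sections_py (items : List (List (String × Option Int))) (sub_lookup : List (Int × Option Int × List (String × String))) : List (Int × Option Int) :=
  pvFinA (items.foldl (pvStepA sub_lookup) (PySem.Set.empty, none, false))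

-- ===== PORT B =====
-- `sections[-1][1].append(item)` : rebuild the list with the last element modified
def pvModifyLast {α : Type} (f : α → α) : List α → List α
  | [] => []
  | [x] => [f x]
  | x :: y :: xs => x :: pvModifyLast f (y :: xs)

-- loop body of B's first pass: the list of (start key, items of the section)
def pvStepB (sub_lookup : List (Int × Option Int × List (String × String)))
    (secs : List ((Int × Option Int) × List (List (String × Option Int))))
    (item : List (String × Option Int)) :
    List ((Int × Option Int) × List (List (String × Option Int))) :=
  let secs :=
    match pvSectionKey? sub_lookup item with
    | some k => secs ++ [(k, [])]      -- sections.append((key, []))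
    | none => secs
  if secs.isEmpty then secs            -- if sections: sections[-1][1].append(item)
  else pvModifyLast (fun g => (g.1, g.2 ++ [item])) secs

-- any("binary_addr" in it for it in group)
def pvHasBin (g : List (List (String × Option Int))) : Bool :=
  g.any (fun it => (PySem.Dict.mk it).contains "binary_addr")

-- B's second pass: the set comprehension, folded in section order
def pvCollect (s : PySem.Set (Int × Option Int))
    (secs : List ((Int × Option Int) × List (List (String × Option Int)))) :
    PySem.Set (Int × Option Int) :=
  secs.foldl (fun s g => if pvHasBin g.2 then s.add g.1 else s) s

def find_relocated_sections_py_alt (items : List (List (String × Option Int))) (sub_lookup : List (Int × Option Int × List (String × String))) : List (Int × Option Int) :=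
  pvCollect PySem.Set.empty (items.foldl (pvStepB sub_lookup) [])

-- ===== PRECONDITION & SPEC =====
-- Pre_ excludes exactly the inputs where some item lacks the "addr" key, on which
-- Python's item["addr"] raises KeyError.
def Pre_find_relocated_sections_py (items : List (List (String × Option Int))) (sub_lookup : List (Int × Option Int × List (String × String))) : Prop :=
  ∀ item ∈ items, (PySem.Dict.mk item).contains "addr" = true
instance (items : List (List (String × Option Int))) (sub_lookup : List (Int × Option Int × List (String × String))) : Decidable (Pre_find_relocated_sections_py items sub_lookup) := by unfold Pre_find_relocated_sections_py; infer_instance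

def pvWitness_find_relocated_sections_py : (List (List (String × Option Int))) × (List (Int × Option Int × List (String × String))) :=
  ([[("addr", some 10), ("binary_addr", some 7)], [("addr", some 11)]],
   [(10, some 7, [("title", "sub")])])

def Spec_find_relocated_sections_py (items : List (List (String × Option Int))) (sub_lookup : List (Int × Option Int × List (String × String))) (out : List (Int × Option Int)) : Prop := out = find_relocated_sections_py_alt items sub_lookup
instance (items : List (List (String × Option Int))) (sub_lookup : List (Int × Option Int × List (String × String))) (out : List (Int × Option Int)) : Decidable (Spec_find_relocated_sections_py items sub_lookup out) := by unfold Spec_find_relocated_sections_py; infer_instance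

-- ===== CLAIM (what is proved, stated in full; the proofs are below) =====
def Claim_equal_find_relocated_sections_py : Prop := ∀ (items : List (List (String × Option Int))) (sub_lookup : List (Int × Option Int × List (String × String))), Dom_find_relocated_sections_py items sub_lookup → Pre_find_relocated_sections_py items sub_lookup → Spec_find_relocated_sections_py items sub_lookup (find_relocated_sections_py items sub_lookup)

-- ===== LEMMAS AND PROOFS =====

theorem pvModifyLast_ne_nil {α : Type} (f : α → α) (xs : List α) (h : xs ≠ []) :
    pvModifyLast f xs ≠ [] := by
  cases xs with
  | nil => exact absurd rfl h
  | cons x xs => cases xs <;> simp [pvModifyLast]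

theorem pvModifyLast_append {α : Type} (f : α → α) (init tail : List α) (h : tail ≠ []) :
    pvModifyLast f (init ++ tail) = init ++ pvModifyLast f tail := by
  induction init with
  | nil => rfl
  | cons x xs ih =>
    cases hx : xs ++ tail with
    | nil => cases tail <;> simp_all
    | cons y ys => simp [pvModifyLast, hx, ← ih]

theorem pvStepB_append (sl : List (Int × Option Int × List (String × String)))
    (init tail : List ((Int × Option Int) × List (List (String × Option Int))))
    (item : List (String × Option Int)) (h : tail ≠ []) :
    pvStepB sl (init ++ tail) item = init ++ pvStepB sl tail item := by
  cases hk : pvSectionKey? sl item with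
  | some k =>
    have h2 : tail ++ [(k, ([] : List (List (String × Option Int))))] ≠ [] := by simp
    simp only [pvStepB, hk, List.append_assoc]
    rw [List.isEmpty_eq_false_iff.mpr (by simp : init ++ (tail ++ [(k, [])]) ≠ []),
        List.isEmpty_eq_false_iff.mpr h2]
    simp only [Bool.false_eq_true, if_false]
    exact pvModifyLast_append _ init _ h2
  | none =>
    simp only [pvStepB, hk]
    rw [List.isEmpty_eq_false_iff.mpr (by simp [h] : init ++ tail ≠ []),
        List.isEmpty_eq_false_iff.mpr h]
    simp only [Bool.false_eq_true, if_false]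
    exact pvModifyLast_append _ init tail h

theorem pvStepB_ne_nil (sl : List (Int × Option Int × List (String × String)))
    (secs : List ((Int × Option Int) × List (List (String × Option Int))))
    (item : List (String × Option Int)) (h : secs ≠ []) :
    pvStepB sl secs item ≠ [] := by
  cases hk : pvSectionKey? sl item with
  | some k =>
    simp only [pvStepB, hk]
    rw [List.isEmpty_eq_false_iff.mpr (by simp : secs ++ [(k, [])] ≠ [])]
    simp only [Bool.false_eq_true, if_false]
    exact pvModifyLast_ne_nil _ _ (by simp)
  | none =>
    simp only [pvStepB, hk]
    rw [List.isEmpty_eq_false_iff.mpr h]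
    simp only [Bool.false_eq_true, if_false]
    exact pvModifyLast_ne_nil _ _ h

theorem pvFoldB_append (sl : List (Int × Option Int × List (String × String)))
    (rest : List (List (String × Option Int)))
    (init : List ((Int × Option Int) × List (List (String × Option Int)))) :
    ∀ tail, tail ≠ [] →
    List.foldl (pvStepB sl) (init ++ tail) rest = init ++ List.foldl (pvStepB sl) tail rest := by
  induction rest with
  | nil => intro tail h; rfl
  | cons it rest ih =>
    intro tail h
    simp only [List.foldl_cons, pvStepB_append sl init tail it h]
    exact ih _ (pvStepB_ne_nil sl tail it h)

theorem pvStepA_some_key (sl : List (Int × Option Int × List (String × String)))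
    (s : PySem.Set (Int × Option Int)) (cs : Option (Int × Option Int)) (hb : Bool)
    (it : List (String × Option Int)) (k : Int × Option Int)
    (hk : pvSectionKey? sl it = some k) :
    pvStepA sl (s, cs, hb) it
      = ((if hb then (match cs with | some c => s.add c | none => s) else s), some k,
         (PySem.Dict.mk it).contains "binary_addr") := by
  simp only [pvStepA, hk]
  cases hc : (PySem.Dict.mk it).contains "binary_addr" <;> simp

theorem pvStepA_none_key (sl : List (Int × Option Int × List (String × String)))
    (s : PySem.Set (Int × Option Int)) (cs : Option (Int × Option Int)) (hb : Bool)
    (it : List (String × Option Int))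
    (hk : pvSectionKey? sl it = none) :
    pvStepA sl (s, cs, hb) it = (s, cs, hb || (PySem.Dict.mk it).contains "binary_addr") := by
  simp only [pvStepA, hk]
  cases hb <;> cases hc : (PySem.Dict.mk it).contains "binary_addr" <;> simp

theorem pvHasBin_append (g : List (List (String × Option Int))) (it : List (String × Option Int)) :
    pvHasBin (g ++ [it]) = (pvHasBin g || (PySem.Dict.mk it).contains "binary_addr") := by
  simp only [pvHasBin, List.any_append, List.any_cons, List.any_nil, Bool.or_false]

theorem pvHasBin_single (it : List (String × Option Int)) :
    pvHasBin [it] = (PySem.Dict.mk it).contains "binary_addr" := by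
  simp only [pvHasBin, List.any_cons, List.any_nil, Bool.or_false]

theorem pvL1 (sl : List (Int × Option Int × List (String × String)))
    (rest : List (List (String × Option Int))) :
    ∀ (s : PySem.Set (Int × Option Int)) (k : Int × Option Int)
      (g : List (List (String × Option Int))),
    pvFinA (List.foldl (pvStepA sl) (s, some k, pvHasBin g) rest)
      = pvCollect s (List.foldl (pvStepB sl) [(k, g)] rest) := by
  induction rest with
  | nil => intro s k g; rfl
  | cons it rest ih =>
    intro s k g
    simp only [List.foldl_cons]
    cases hk : pvSectionKey? sl it with
    | some k' =>
      rw [pvStepA_some_key sl s (some k) (pvHasBin g) it k' hk]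
      have hstepB : pvStepB sl [(k, g)] it = [(k, g), (k', [it])] := by
        simp [pvStepB, hk, pvModifyLast]
      rw [hstepB,
        show ([(k, g), (k', [it])] :
          List ((Int × Option Int) × List (List (String × Option Int))))
          = [(k, g)] ++ [(k', [it])] from rfl,
        pvFoldB_append sl rest [(k, g)] [(k', [it])] (by simp),
        ← pvHasBin_single it, ih (if pvHasBin g then s.add k else s) k' [it]]
      rfl
    | none =>
      rw [pvStepA_none_key sl s (some k) (pvHasBin g) it hk, ← pvHasBin_append g it]
      have hstepB : pvStepB sl [(k, g)] it = [(k, g ++ [it])] := by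
        simp [pvStepB, hk, pvModifyLast]
      rw [hstepB, ih s k (g ++ [it])]

theorem pvL0 (sl : List (Int × Option Int × List (String × String)))
    (items : List (List (String × Option Int))) :
    ∀ (s : PySem.Set (Int × Option Int)) (hb : Bool),
    pvFinA (List.foldl (pvStepA sl) (s, none, hb) items)
      = pvCollect s (List.foldl (pvStepB sl) [] items) := by
  induction items with
  | nil => intro s hb; rfl
  | cons it items ih =>
    intro s hb
    simp only [List.foldl_cons]
    cases hk : pvSectionKey? sl it with
    | some k' =>
      rw [pvStepA_some_key sl s none hb it k' hk]
      have hstepB : pvStepB sl [] it = [(k', [it])] := by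
        simp [pvStepB, hk, pvModifyLast]
      rw [hstepB, ← pvHasBin_single it]
      have : (if hb then (match (none : Option (Int × Option Int)) with
          | some c => s.add c | none => s) else s) = s := by cases hb <;> rfl
      rw [this, pvL1 sl items s k' [it]]
    | none =>
      rw [pvStepA_none_key sl s none hb it hk]
      have hstepB : pvStepB sl [] it = [] := by simp [pvStepB, hk]
      rw [hstepB, ih s _]

-- ===== VERDICT (by name: the statement is the Claim_ definition above) =====
theorem find_relocated_sections_py_spec : Claim_equal_find_relocated_sections_py := by
  intro items sub_lookup _ _
  unfold Spec_find_relocated_sections_py find_relocated_sections_py find_relocated_sections_py_alt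
  exact pvL0 sub_lookup items PySem.Set.empty false
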